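-- pv_equiv track=rewrite | github.com/randyarbolaez/codesignal | daily-challenges/evenNumbersBeforeFixed.py | evenNumbersBeforeFixed
-- ===== SOURCE A (Python) =====
-- def evenNumbersBeforeFixed(sequence, fixedElement):
--     if fixedElement not in sequence:
--         return -1
--
--     totalNums = 0
--     index = sequence.index(fixedElement)
--
--     for i in range(0, index):
--         if sequence[i] % 2 == 0:
--             totalNums += 1
--     return totalNums
-- ===== SOURCE B (Python) =====
-- def evenNumbersBeforeFixed(sequence, fixedElement):
--     count = 0
--     for x in sequence:
--         if x == fixedElement:
--             return count
--         if x % 2 == 0: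
--             count += 1
--     return -1
-- ===== Notes on version B (the rewrite author's own statement) =====
-- stated objective: simpler
-- what changed: B fuses A's three separate scans (membership test, .index, and a counting loop over the prefix) into one single pass that returns the running even-count at the first match and -1 only after exhausting the list.
import Mathlib
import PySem

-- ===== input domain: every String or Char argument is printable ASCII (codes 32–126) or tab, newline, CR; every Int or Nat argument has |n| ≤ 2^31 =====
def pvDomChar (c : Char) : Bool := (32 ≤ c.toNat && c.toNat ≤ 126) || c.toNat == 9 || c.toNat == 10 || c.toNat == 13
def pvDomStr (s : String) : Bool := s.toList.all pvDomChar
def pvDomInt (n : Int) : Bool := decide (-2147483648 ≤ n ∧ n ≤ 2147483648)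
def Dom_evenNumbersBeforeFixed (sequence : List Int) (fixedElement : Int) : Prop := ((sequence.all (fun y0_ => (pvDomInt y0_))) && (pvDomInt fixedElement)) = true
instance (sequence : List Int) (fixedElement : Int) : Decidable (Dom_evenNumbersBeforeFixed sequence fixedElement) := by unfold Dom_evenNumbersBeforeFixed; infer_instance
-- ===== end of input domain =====

-- B fuses A's three scans (membership, .index, prefix-count loop) into one pass; return value only.

-- ===== PORT A =====
def evenNumbersBeforeFixed (sequence : List Int) (fixedElement : Int) : Int :=
  if fixedElement ∉ sequence then -1
  else
    let totalNums : Int := 0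
    let index : Nat := (PySem.List.index? sequence fixedElement).getD 0
    (PySem.List.pyRange 0 index 1).foldl
      (fun totalNums i =>
        if PySem.Int.mod (PySem.List.pyGetD sequence i 0) 2 = 0 then totalNums + 1 else totalNums)
      totalNums

-- ===== PORT B =====
def evenNumbersBeforeFixedAltGo (fixedElement : Int) (count : Int) : List Int → Int
  | [] => -1
  | x :: xs =>
    if x = fixedElement then count
    else evenNumbersBeforeFixedAltGo fixedElement
           (if PySem.Int.mod x 2 = 0 then count + 1 else count) xs

def evenNumbersBeforeFixed_alt (sequence : List Int) (fixedElement : Int) : Int :=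
  evenNumbersBeforeFixedAltGo fixedElement 0 sequence

-- ===== PRECONDITION & SPEC =====
def Spec_evenNumbersBeforeFixed (sequence : List Int) (fixedElement : Int) (out : Int) : Prop := out = evenNumbersBeforeFixed_alt sequence fixedElement
instance (sequence : List Int) (fixedElement : Int) (out : Int) : Decidable (Spec_evenNumbersBeforeFixed sequence fixedElement out) := by unfold Spec_evenNumbersBeforeFixed; infer_instance

-- ===== CLAIM (what is proved, stated in full; the proofs are below) =====
def Claim_equal_evenNumbersBeforeFixed : Prop := ∀ (sequence : List Int) (fixedElement : Int), Dom_evenNumbersBeforeFixed sequence fixedElement → Spec_evenNumbersBeforeFixed sequence fixedElement (evenNumbersBeforeFixed sequence fixedElement)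

-- ===== LEMMAS AND PROOFS =====

-- B on a list not containing fixedElement returns -1 for any accumulator.
theorem altGo_not_mem (f : Int) (c : Int) (xs : List Int) (h : f ∉ xs) :
    evenNumbersBeforeFixedAltGo f c xs = -1 := by
  induction xs generalizing c with
  | nil => rfl
  | cons x xs ih =>
    simp only [List.mem_cons, not_or] at h
    simp [evenNumbersBeforeFixedAltGo, Ne.symm h.1, ih _ h.2]

-- B on pre ++ f :: suf with f ∉ pre folds the counting step over pre.
theorem altGo_split (f : Int) (pre suf : List Int) (h : f ∉ pre) (c : Int) :
    evenNumbersBeforeFixedAltGo f c (pre ++ f :: suf)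
      = pre.foldl (fun acc x => if PySem.Int.mod x 2 = 0 then acc + 1 else acc) c := by
  induction pre generalizing c with
  | nil => simp [evenNumbersBeforeFixedAltGo]
  | cons x xs ih =>
    simp only [List.mem_cons, not_or] at h
    simp only [List.cons_append, evenNumbersBeforeFixedAltGo, if_neg (Ne.symm h.1),
      List.foldl_cons]
    exact ih h.2 _

-- ===== VERDICT (by name: the statement is the Claim_ definition above) =====
theorem evenNumbersBeforeFixed_spec : Claim_equal_evenNumbersBeforeFixed := by
  intro sequence fixedElement _
  unfold Spec_evenNumbersBeforeFixed evenNumbersBeforeFixed evenNumbersBeforeFixed_alt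
  by_cases hmem : fixedElement ∈ sequence
  · simp only [hmem, not_true_eq_false, if_false]
    obtain ⟨k, hk⟩ := (PySem.List.index?_isSome_iff sequence fixedElement).mpr hmem
      |> Option.isSome_iff_exists.mp
    obtain ⟨pre, suf, hseq, hlen, hpre⟩ := (PySem.List.index?_eq_some_iff _ _ _).mp hk
    subst hseq
    rw [hk, Option.getD_some, ← hlen, altGo_split fixedElement pre suf hpre 0]
    rw [PySem.List.foldl_congr_mem
      (g := fun acc i => if PySem.Int.mod (PySem.List.pyGetD pre i 0) 2 = 0 then acc + 1 else acc)]
    · exact PySem.List.foldl_pyRange_zero_pyGetD' pre 0 (fun acc x => if PySem.Int.mod x 2 = 0 then acc + 1 else acc) 0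
    · intro acc i hi
      rw [PySem.List.mem_pyRange_one] at hi
      congr 1
      rw [PySem.List.pyGetD_eq_getElem _ _ _ (by simp; omega),
          PySem.List.pyGetD_eq_getElem _ _ _ (by omega)]
      rw [List.getElem_append_left (by omega)]
      all_goals exact hi.1
  · simp only [hmem, not_false_eq_true, if_true]
    exact (altGo_not_mem fixedElement 0 sequence hmem).symm
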